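-- pv_equiv track=rewrite | github.com/StefanNede/BIO-Practice | 2012/numberLadder.py | getDifferences
-- ===== SOURCE A (Python) =====
-- def getDifferences(str1, str2):
--     # returns the number of different letters between str1 and str2
--     cstr1 = list(str1)
--     cstr2 = list(str2)
--     for letter in str1:
--         if letter in cstr2:
--             cstr1.remove(letter)
--             cstr2.remove(letter)
--     return len(cstr1) + len(cstr2)
-- ===== SOURCE B (Python) =====
-- def getDifferences(str1, str2):
--     # returns the number of different letters between str1 and str2
--     a = sorted(str1)
--     b = sorted(str2)
--     i = j = 0
--     diff = 0
--     while i < len(a) and j < len(b):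
--         if a[i] == b[j]:
--             i += 1
--             j += 1
--         elif a[i] < b[j]:
--             diff += 1
--             i += 1
--         else:
--             diff += 1
--             j += 1
--     return diff + (len(a) - i) + (len(b) - j)
-- ===== Notes on version B (the rewrite author's own statement) =====
-- stated objective: faster
-- what changed: Replaces A's nested scans (membership test plus two list.remove per letter) with sorting both strings and a single two-pointer merge that counts unmatched characters.
import Mathlib
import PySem

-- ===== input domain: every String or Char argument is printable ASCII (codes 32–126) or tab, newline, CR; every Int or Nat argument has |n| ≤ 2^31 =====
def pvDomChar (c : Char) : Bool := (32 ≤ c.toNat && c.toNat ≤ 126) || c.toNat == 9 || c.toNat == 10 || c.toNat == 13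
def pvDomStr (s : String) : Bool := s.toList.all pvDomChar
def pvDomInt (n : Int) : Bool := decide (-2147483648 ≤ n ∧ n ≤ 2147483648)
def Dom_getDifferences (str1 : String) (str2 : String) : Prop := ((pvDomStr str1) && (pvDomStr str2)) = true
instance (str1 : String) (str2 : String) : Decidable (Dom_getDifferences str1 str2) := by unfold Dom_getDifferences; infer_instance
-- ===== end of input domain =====

-- B replaces A's quadratic remove-based matching loop with sort + two-pointer merge (objective: faster).


-- ===== PORT A =====
-- the 'for letter in str1' loop over state (cstr1, cstr2); the '.getD' arms are unreachable:
-- the guard 'letter in cstr2' holds and every processed letter is still in cstr1 (proved below)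
def pvLoopA (letters : List Char) (c1 : List Char) (c2 : List Char) : List Char × List Char :=
  match letters with
  | [] => (c1, c2)
  | l :: rest =>
    if l ∈ c2 then
      pvLoopA rest ((PySem.List.remove? c1 l).getD c1) ((PySem.List.remove? c2 l).getD c2)
    else
      pvLoopA rest c1 c2

def getDifferences (str1 : String) (str2 : String) : Int :=
  let cstr1 := str1.toList
  let cstr2 := str2.toList
  let res := pvLoopA str1.toList cstr1 cstr2
  (res.1.length : Int) + (res.2.length : Int)

-- ===== PORT B =====
-- two-pointer merge over the two sorted lists, counting unmatched elements
def pvMergeDiff (a : List Char) (b : List Char) : Int :=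
  match a, b with
  | [], b => (b.length : Int)
  | x :: xs, [] => ((x :: xs).length : Int)
  | x :: xs, y :: ys =>
    if x = y then pvMergeDiff xs ys
    else if x < y then 1 + pvMergeDiff xs (y :: ys)
    else 1 + pvMergeDiff (x :: xs) ys
termination_by (a.length + b.length)

def getDifferences_alt (str1 : String) (str2 : String) : Int :=
  pvMergeDiff (PySem.List.sorted str1.toList (fun x => x) false)
              (PySem.List.sorted str2.toList (fun x => x) false)

-- ===== PRECONDITION & SPEC =====
def Spec_getDifferences (str1 : String) (str2 : String) (out : Int) : Prop := out = getDifferences_alt str1 str2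
instance (str1 : String) (str2 : String) (out : Int) : Decidable (Spec_getDifferences str1 str2 out) := by unfold Spec_getDifferences; infer_instance

-- ===== CLAIM (what is proved, stated in full; the proofs are below) =====
def Claim_equal_getDifferences : Prop := ∀ (str1 : String) (str2 : String), Dom_getDifferences str1 str2 → Spec_getDifferences str1 str2 (getDifferences str1 str2)

-- ===== LEMMAS AND PROOFS =====

-- A's loop: lengths of the final state, via the multiset intersection
theorem pvLoopA_len (letters : List Char) (c1 c2 : List Char)
    (h : (letters : Multiset Char) ≤ (c1 : Multiset Char)) :
    (pvLoopA letters c1 c2).1.length + (pvLoopA letters c1 c2).2.length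
      + 2 * Multiset.card ((letters : Multiset Char) ∩ (c2 : Multiset Char))
      = c1.length + c2.length := by
  induction letters generalizing c1 c2 with
  | nil => simp [pvLoopA]
  | cons l rest ih =>
    have hl1 : l ∈ c1 := by
      have : l ∈ ((l :: rest : List Char) : Multiset Char) := by simp
      exact Multiset.mem_of_le h this
    by_cases hl2 : l ∈ c2
    · have e1 : PySem.List.remove? c1 l = some (c1.erase l) :=
        PySem.List.remove?_eq_some_erase c1 l hl1
      have e2 : PySem.List.remove? c2 l = some (c2.erase l) :=
        PySem.List.remove?_eq_some_erase c2 l hl2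
      have hle : ((rest : List Char) : Multiset Char) ≤ ((c1.erase l : List Char) : Multiset Char) := by
        rw [← Multiset.coe_erase]
        have := Multiset.erase_le_erase (a := l) h
        simpa using this
      have := ih (c1.erase l) (c2.erase l) hle
      simp only [pvLoopA, if_pos hl2, e1, e2, Option.getD_some]
      have hint : ((l :: rest : List Char) : Multiset Char) ∩ (c2 : Multiset Char)
          = l ::ₘ ((rest : Multiset Char) ∩ ((c2.erase l : List Char) : Multiset Char)) := by
        rw [← Multiset.coe_erase, ← Multiset.cons_coe]
        exact Multiset.cons_inter_of_pos _ hl2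
      rw [hint]
      have l1 : (c1.erase l).length + 1 = c1.length := List.length_erase_add_one hl1
      have l2 : (c2.erase l).length + 1 = c2.length := List.length_erase_add_one hl2
      simp only [Multiset.card_cons] at *
      omega
    · have hle : ((rest : List Char) : Multiset Char) ≤ (c1 : Multiset Char) :=
        le_trans (by simpa using Multiset.le_cons_self (rest : Multiset Char) l) h
      have := ih c1 c2 hle
      simp only [pvLoopA, if_neg hl2]
      have hint : ((l :: rest : List Char) : Multiset Char) ∩ (c2 : Multiset Char)
          = (rest : Multiset Char) ∩ (c2 : Multiset Char) := by
        rw [← Multiset.cons_coe]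
        exact Multiset.cons_inter_of_neg _ hl2
      rw [hint]
      omega

-- B's merge on sorted (Pairwise ≤) lists computes the multiset symmetric-difference cardinality
-- (x ∉ b): one unmatched copy of x survives on the left, nothing changes on the right
theorem pv_sub_cons_left (x : Char) (xs b : List Char) (hx : x ∉ b) :
    ((x :: xs : List Char) : Multiset Char) - (b : Multiset Char)
      = x ::ₘ ((xs : Multiset Char) - (b : Multiset Char)) := by
  have h0 : Multiset.count x (b : Multiset Char) = 0 :=
    Multiset.count_eq_zero.mpr (by simpa using hx)
  rw [← Multiset.cons_coe]
  ext c
  rw [Multiset.count_sub, Multiset.count_cons, Multiset.count_cons, Multiset.count_sub]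
  by_cases hc : c = x
  · subst hc; omega
  · simp only [if_neg hc]; omega

theorem pv_cons_sub_cons (x : Char) (s t : Multiset Char) :
    (x ::ₘ s) - (x ::ₘ t) = s - t := by
  ext c
  rw [Multiset.count_sub, Multiset.count_sub, Multiset.count_cons, Multiset.count_cons]
  by_cases hc : c = x
  · simp only [if_pos hc]; omega
  · simp only [if_neg hc]; omega

theorem pv_sub_cons_right (x : Char) (xs b : List Char) (hx : x ∉ b) :
    (b : Multiset Char) - ((x :: xs : List Char) : Multiset Char)
      = (b : Multiset Char) - (xs : Multiset Char) := by
  have h0 : Multiset.count x (b : Multiset Char) = 0 :=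
    Multiset.count_eq_zero.mpr (by simpa using hx)
  rw [← Multiset.cons_coe]
  ext c
  rw [Multiset.count_sub, Multiset.count_sub, Multiset.count_cons]
  by_cases hc : c = x
  · subst hc; omega
  · simp only [if_neg hc, add_zero]

theorem pvMergeDiff_sd (a b : List Char)
    (ha : a.Pairwise (· ≤ ·)) (hb : b.Pairwise (· ≤ ·)) :
    pvMergeDiff a b
      = ((Multiset.card ((a : Multiset Char) - (b : Multiset Char))
        + Multiset.card ((b : Multiset Char) - (a : Multiset Char)) : ℕ) : Int) := by
  induction a generalizing b with
  | nil => simp [pvMergeDiff]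
  | cons x xs iha =>
    induction b with
    | nil => simp [pvMergeDiff]
    | cons y ys ihb =>
      have hxs : xs.Pairwise (· ≤ ·) := ha.tail
      have hys : ys.Pairwise (· ≤ ·) := hb.tail
      by_cases hxy : x = y
      · subst hxy
        have heq : pvMergeDiff (x :: xs) (x :: ys) = pvMergeDiff xs ys := by
          simp [pvMergeDiff]
        rw [heq, iha ys hxs hys]
        simp only [← Multiset.cons_coe]
        rw [pv_cons_sub_cons, pv_cons_sub_cons]
      · by_cases hlt : x < y
        · -- x precedes everything in y :: ys, so x is unmatched
          have hxnb : x ∉ (y :: ys) := by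
            intro hmem
            rcases List.mem_cons.mp hmem with h | h
            · exact hxy h
            · exact absurd (lt_of_lt_of_le hlt ((List.pairwise_cons.mp hb).1 x h)) (lt_irrefl x)
          have := iha (y :: ys) hxs hb
          simp only [pvMergeDiff, if_neg hxy, if_pos hlt]
          rw [this]
          rw [pv_sub_cons_left x xs (y :: ys) hxnb, pv_sub_cons_right x xs (y :: ys) hxnb,
            Multiset.card_cons]
          push_cast; ring
        · -- y < x : symmetric
          have hylt : y < x := lt_of_le_of_ne (le_of_not_gt hlt) (Ne.symm hxy)
          have hyna : y ∉ (x :: xs) := by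
            intro hmem
            rcases List.mem_cons.mp hmem with h | h
            · exact hxy h.symm
            · exact absurd (lt_of_lt_of_le hylt ((List.pairwise_cons.mp ha).1 y h)) (lt_irrefl y)
          have := ihb hys
          simp only [pvMergeDiff, if_neg hxy, if_neg hlt]
          rw [this]
          rw [pv_sub_cons_left y ys (x :: xs) hyna, pv_sub_cons_right y ys (x :: xs) hyna,
            Multiset.card_cons]
          push_cast; ring

-- card of symmetric difference = |s| + |t| - 2|s ∩ t|
theorem sd_card (s t : Multiset Char) :
    Multiset.card (s - t) + Multiset.card (t - s) + 2 * Multiset.card (s ∩ t)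
      = Multiset.card s + Multiset.card t := by
  have h1 := congrArg Multiset.card (Multiset.sub_add_inter s t)
  have h2 := congrArg Multiset.card (Multiset.sub_add_inter t s)
  rw [Multiset.card_add] at h1 h2
  rw [Multiset.inter_comm] at h2
  omega

-- ===== VERDICT (by name: the statement is the Claim_ definition above) =====
theorem getDifferences_spec : Claim_equal_getDifferences := by
  intro str1 str2 _
  unfold Spec_getDifferences
  set xs := str1.toList with hxs
  set ys := str2.toList with hys
  have hGA : getDifferences str1 str2
      = ((pvLoopA xs xs ys).1.length : Int) + ((pvLoopA xs xs ys).2.length : Int) := rfl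
  have hGB : getDifferences_alt str1 str2
      = pvMergeDiff (PySem.List.sorted xs (fun x => x) false)
                    (PySem.List.sorted ys (fun x => x) false) := rfl
  have hA := pvLoopA_len xs xs ys (le_refl _)
  have hsa : (PySem.List.sorted xs (fun x => x) false).Pairwise (· ≤ ·) := by
    simpa using PySem.List.sorted_pairwise xs (fun x => x)
  have hsb : (PySem.List.sorted ys (fun x => x) false).Pairwise (· ≤ ·) := by
    simpa using PySem.List.sorted_pairwise ys (fun x => x)
  have hB := pvMergeDiff_sd _ _ hsa hsb
  have hpa : ((PySem.List.sorted xs (fun x => x) false : List Char) : Multiset Char) = (xs : Multiset Char) :=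
    Multiset.coe_eq_coe.mpr (PySem.List.sorted_perm xs (fun x => x) false)
  have hpb : ((PySem.List.sorted ys (fun x => x) false : List Char) : Multiset Char) = (ys : Multiset Char) :=
    Multiset.coe_eq_coe.mpr (PySem.List.sorted_perm ys (fun x => x) false)
  rw [hpa, hpb] at hB
  have hsd := sd_card (xs : Multiset Char) (ys : Multiset Char)
  simp only [Multiset.coe_card] at hsd hA
  rw [hGA, hGB, hB]
  omega
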